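-- pv_equiv track=rewrite | github.com/MohammadKhGh99/Programming-Skill-Preparation | ex11.py | can_reach_target
-- ===== SOURCE A (Python) =====
-- from typing import List
--
-- def can_reach_target(cur_pos: tuple[int, int], grid: List[List[int]], start: tuple[int, int], target: tuple[int, int], k: int):
-- 	# we reach the target
-- 	if cur_pos == target:
-- 		return True
-- 	# we didn't reach the target ,but we reach our maximum moves
-- 	elif k == 0:
-- 		return False
--
-- 	# down - (1, 0)
-- 	# up - (-1, 0)
-- 	# right - (0, 1)
-- 	# left - (0, -1)
-- 	directions = [(1, 0), (0, 1), (-1, 0), (0, -1)]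
-- 	# iterate over all the options in each cell
-- 	for direction in directions:
-- 		# check the chosen option if it is not going outside the borders or if there is a rock in the new position
-- 		temp_pos = cur_pos[0] + direction[0], cur_pos[1] + direction[1]
-- 		if temp_pos[0] < 0 or temp_pos[0] >= len(grid[0]) or temp_pos[1] < 0 or temp_pos[1] >= len(grid) or grid[temp_pos[0]][temp_pos[1]] == 1:
-- 			# if the chosen move is not valid, so continue to the next option
-- 			continue
-- 		else:
-- 			# if the chosen option is valid and we reach the target
-- 			if can_reach_target(temp_pos, grid, start, target, k - 1):
-- 				return True
--
-- 	return False
-- ===== SOURCE B (Python) =====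
-- def can_reach_target(cur_pos, grid, start, target, k):
--     # BFS-style level expansion: grow the set of cells reachable from cur_pos
--     # one step per move budget, stopping early once the set saturates.
--     if cur_pos == target:
--         return True
--     if k <= 0:
--         return False
--     n_x = len(grid[0])
--     n_y = len(grid)
--
--     def valid(q):
--         x, y = q
--         return 0 <= x < n_x and 0 <= y < n_y and grid[x][y] != 1
--
--     reached = {cur_pos}
--     while k > 0:
--         new = reached | {q for (x, y) in reached
--                          for q in ((x + 1, y), (x, y + 1), (x - 1, y), (x, y - 1))
--                          if valid(q)}
--         if new == reached:
--             break
--         reached = new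
--         k -= 1
--     return target in reached
-- ===== Notes on version B (the rewrite author's own statement) =====
-- stated objective: alternative
-- what changed: Replaced the depth-k DFS recursion without a visited set by an iterative BFS-style level expansion of the set of cells reachable from cur_pos, with early exit once the set saturates.
-- outside the precondition, e.g. on can_reach_target((0, 1), [[0, 0], [0, 0]], (0, 0), (1, 1), -1): A returns True, B returns False; on can_reach_target((0, 1), [[0], [0]], (0, 0), (0, 0), 2): A returns True, B raises IndexError
import Mathlib
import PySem

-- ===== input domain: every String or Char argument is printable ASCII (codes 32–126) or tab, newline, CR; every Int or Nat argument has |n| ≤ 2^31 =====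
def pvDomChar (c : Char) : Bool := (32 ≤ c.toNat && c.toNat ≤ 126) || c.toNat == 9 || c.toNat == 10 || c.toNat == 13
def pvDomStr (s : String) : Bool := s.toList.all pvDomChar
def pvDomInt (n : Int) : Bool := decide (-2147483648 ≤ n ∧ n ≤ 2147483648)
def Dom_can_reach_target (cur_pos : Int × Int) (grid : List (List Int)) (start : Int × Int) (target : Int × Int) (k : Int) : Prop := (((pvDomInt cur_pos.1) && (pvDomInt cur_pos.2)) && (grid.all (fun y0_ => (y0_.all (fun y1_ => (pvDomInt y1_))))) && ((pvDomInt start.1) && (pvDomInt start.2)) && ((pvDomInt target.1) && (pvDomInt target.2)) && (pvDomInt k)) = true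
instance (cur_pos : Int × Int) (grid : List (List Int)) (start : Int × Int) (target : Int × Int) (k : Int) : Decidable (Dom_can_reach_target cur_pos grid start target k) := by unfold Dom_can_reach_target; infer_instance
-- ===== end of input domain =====

-- B replaces A's depth-k DFS recursion (no visited set) by an iterative BFS-style level
-- expansion of the reachable-cell set with early saturation exit (objective: alternative).

-- ===== PORT A =====
-- Literal port of A's DFS. Python recurses unboundedly for k < 0 (outside Pre_); the
-- `k < 0 → false` branch is only a totality guard. `grid[0]` / `grid[x][y]` are ported with
-- pyGet?/pyGetD defaults: exact wherever Python does not raise IndexError (ensured by Pre_).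
def can_reach_target (cur_pos : Int × Int) (grid : List (List Int)) (start : Int × Int) (target : Int × Int) (k : Int) : Bool :=
  if cur_pos = target then true
  else if k = 0 then false
  else if k < 0 then false  -- totality guard: Python diverges here; outside Pre_
  else
    [((1:Int),(0:Int)),(0,1),(-1,0),(0,-1)].any (fun d =>
      let t := (cur_pos.1 + d.1, cur_pos.2 + d.2)
      if t.1 < 0 ∨ (((PySem.List.pyGet? grid 0).getD []).length : Int) ≤ t.1
          ∨ t.2 < 0 ∨ (grid.length : Int) ≤ t.2
          ∨ PySem.List.pyGetD ((PySem.List.pyGet? grid t.1).getD []) t.2 0 = 1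
      then false
      else can_reach_target t grid start target (k-1))
termination_by k.toNat
decreasing_by omega

-- ===== PORT B =====
-- helper `valid(q)` of Source B (same pyGet?/pyGetD treatment of grid indexing as in port A)
def bValid (grid : List (List Int)) (q : Int × Int) : Bool :=
  decide (0 ≤ q.1) && decide (q.1 < (((PySem.List.pyGet? grid 0).getD []).length : Int))
  && decide (0 ≤ q.2) && decide (q.2 < (grid.length : Int))
  && decide (PySem.List.pyGetD ((PySem.List.pyGet? grid q.1).getD []) q.2 0 ≠ 1)

-- the four candidate neighbours of a cell, in Source B's tuple order
def bNbrs (p : Int × Int) : List (Int × Int) :=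
  [(p.1 + 1, p.2), (p.1, p.2 + 1), (p.1 - 1, p.2), (p.1, p.2 - 1)]

-- `reached | {q for (x,y) in reached for q in nbrs if valid(q)}`
def bGrow (grid : List (List Int)) (reached : PySem.Set (Int × Int)) : PySem.Set (Int × Int) :=
  PySem.Set.union reached ((reached.flatMap bNbrs).filter (bValid grid))

-- the `while k > 0` loop of Source B, fuel = k.toNat; the `if new == reached: break` is
-- Python set equality (PySem.Set.equal); on fuel 0 or break we return `target in reached`
def bLoop (grid : List (List Int)) (target : Int × Int) : Nat → PySem.Set (Int × Int) → Bool
  | 0, reached => PySem.Set.contains reached target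
  | j+1, reached =>
      let new := bGrow grid reached
      if PySem.Set.equal new reached then PySem.Set.contains reached target
      else bLoop grid target j new

def can_reach_target_alt (cur_pos : Int × Int) (grid : List (List Int)) (start : Int × Int) (target : Int × Int) (k : Int) : Bool :=
  if cur_pos = target then true
  else if k ≤ 0 then false
  else bLoop grid target k.toNat (PySem.Set.ofList [cur_pos])

-- ===== PRECONDITION & SPEC =====
-- Pre_ excludes inputs on which Python A raises or diverges, plus two corners where A still
-- returns an accidental value: (a) k < 0 with cur_pos ≠ target — A recurses unboundedly in
-- general (RecursionError) and, when it does return, the value is an accident of DFS order;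
-- (b) k > 0 with an empty or non-square grid — A's bound check mixes rows and columns and
-- raises IndexError on most such inputs, returning only when DFS order happens to avoid the
-- bad index.
def Pre_can_reach_target (cur_pos : Int × Int) (grid : List (List Int)) (start : Int × Int) (target : Int × Int) (k : Int) : Prop :=
  cur_pos = target ∨ k = 0 ∨ (0 < k ∧ grid ≠ [] ∧ ∀ row ∈ grid, row.length = grid.length)

instance (cur_pos : Int × Int) (grid : List (List Int)) (start : Int × Int) (target : Int × Int) (k : Int) : Decidable (Pre_can_reach_target cur_pos grid start target k) := by
  unfold Pre_can_reach_target; infer_instance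

def pvWitness_can_reach_target : (Int × Int) × List (List Int) × (Int × Int) × (Int × Int) × Int :=
  ((0, 0), [[0, 0], [0, 0]], (0, 0), (1, 1), 2)

def Spec_can_reach_target (cur_pos : Int × Int) (grid : List (List Int)) (start : Int × Int) (target : Int × Int) (k : Int) (out : Bool) : Prop := out = can_reach_target_alt cur_pos grid start target k
instance (cur_pos : Int × Int) (grid : List (List Int)) (start : Int × Int) (target : Int × Int) (k : Int) (out : Bool) : Decidable (Spec_can_reach_target cur_pos grid start target k out) := by unfold Spec_can_reach_target; infer_instance

-- ===== CLAIM (what is proved, stated in full; the proofs are below) =====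
def Claim_equal_can_reach_target : Prop := ∀ (cur_pos : Int × Int) (grid : List (List Int)) (start : Int × Int) (target : Int × Int) (k : Int), Dom_can_reach_target cur_pos grid start target k → Pre_can_reach_target cur_pos grid start target k → Spec_can_reach_target cur_pos grid start target k (can_reach_target cur_pos grid start target k)

-- ===== LEMMAS AND PROOFS =====

-- "target reachable from p in at most n valid moves", the common characterisation of both ports
def Wb (grid : List (List Int)) (target : Int × Int) : Nat → (Int × Int) → Bool
  | 0, p => p = target
  | n+1, p => p = target || (bNbrs p).any (fun q => bValid grid q && Wb grid target n q)

theorem Wb_target (grid : List (List Int)) (target : Int × Int) (n : Nat) :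
    Wb grid target n target = true := by
  cases n <;> simp [Wb]

theorem Wb_succ (grid : List (List Int)) (target : Int × Int) (n : Nat) (p : Int × Int) :
    Wb grid target (n+1) p
      = (decide (p = target) || (bNbrs p).any (fun q => bValid grid q && Wb grid target n q)) := rfl

theorem Wb_mono (grid : List (List Int)) (target : Int × Int) (n : Nat) (p : Int × Int)
    (h : Wb grid target n p = true) : Wb grid target (n+1) p = true := by
  induction n generalizing p with
  | zero => simp [Wb] at h; simp [Wb_succ, h]
  | succ m ih =>
    rw [Wb_succ] at h ⊢
    simp only [Bool.or_eq_true, List.any_eq_true, Bool.and_eq_true] at h ⊢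
    rcases h with h | ⟨q, hq, hv, hw⟩
    · exact Or.inl h
    · exact Or.inr ⟨q, hq, hv, ih q hw⟩

-- A's branch condition is the negation of Source B's `valid`
theorem A_cond (grid : List (List Int)) (a b : Int) (r : Bool) :
    (if a < 0 ∨ (((PySem.List.pyGet? grid 0).getD []).length : Int) ≤ a
        ∨ b < 0 ∨ (grid.length : Int) ≤ b
        ∨ PySem.List.pyGetD ((PySem.List.pyGet? grid a).getD []) b 0 = 1
     then false else r) = (bValid grid (a, b) && r) := by
  split_ifs with h
  · rcases hb : bValid grid (a, b) with _ | _
    · simp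
    · exfalso
      simp only [bValid, Bool.and_eq_true, decide_eq_true_eq] at hb
      obtain ⟨⟨⟨⟨h1, h2⟩, h3⟩, h4⟩, h5⟩ := hb
      rcases h with h | h | h | h | h
      · omega
      · omega
      · omega
      · omega
      · exact h5 h
  · push_neg at h
    obtain ⟨h1, h2, h3, h4, h5⟩ := h
    have hb : bValid grid (a, b) = true := by
      simp only [bValid, Bool.and_eq_true, decide_eq_true_eq]
      exact ⟨⟨⟨⟨by omega, by omega⟩, by omega⟩, by omega⟩, h5⟩
    rw [hb, Bool.true_and]

theorem A_eq_Wb (grid : List (List Int)) (s target : Int × Int) :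
    ∀ (n : Nat) (k : Int), 0 ≤ k → k.toNat = n → ∀ cur,
      can_reach_target cur grid s target k = Wb grid target n cur := by
  intro n
  induction n with
  | zero =>
    intro k hk hkn cur
    have : k = 0 := by omega
    subst this
    rw [can_reach_target]
    simp [Wb]
  | succ m ih =>
    intro k hk hkn cur
    have hk1 : k ≠ 0 := by omega
    have hk2 : ¬ k < 0 := by omega
    rw [can_reach_target]
    by_cases hct : cur = target
    · simp [hct, Wb]
    · simp only [hct, if_false, hk1, hk2, if_false]
      have hrec : ∀ t, can_reach_target t grid s target (k-1) = Wb grid target m t := by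
        intro t; exact ih (k-1) (by omega) (by omega) t
      simp only [hrec]
      simp only [Wb, hct]
      simp only [List.any_cons, List.any_nil, bNbrs, add_zero, sub_eq_add_neg]
      simp only [A_cond, decide_false, Bool.false_or]

theorem mem_bGrow (grid : List (List Int)) (S : PySem.Set (Int × Int)) (x : Int × Int) :
    x ∈ bGrow grid S ↔ x ∈ S ∨ ((∃ p ∈ S, x ∈ bNbrs p) ∧ bValid grid x = true) := by
  simp [bGrow, PySem.Set.mem_union, List.mem_filter, List.mem_flatMap]

theorem step_iff (grid : List (List Int)) (target : Int × Int) (S : PySem.Set (Int × Int)) (n : Nat) :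
    (∃ q ∈ bGrow grid S, Wb grid target n q = true) ↔ (∃ p ∈ S, Wb grid target (n+1) p = true) := by
  constructor
  · rintro ⟨q, hq, hw⟩
    rcases (mem_bGrow grid S q).1 hq with hqS | ⟨⟨p, hpS, hnb⟩, hv⟩
    · exact ⟨q, hqS, Wb_mono _ _ _ _ hw⟩
    · refine ⟨p, hpS, ?_⟩
      simp only [Wb, Bool.or_eq_true, List.any_eq_true, Bool.and_eq_true]
      exact Or.inr ⟨q, hnb, hv, hw⟩
  · rintro ⟨p, hpS, hw⟩
    simp only [Wb, Bool.or_eq_true, List.any_eq_true, Bool.and_eq_true, decide_eq_true_eq] at hw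
    rcases hw with hpt | ⟨q, hnb, hv, hw⟩
    · exact ⟨p, (mem_bGrow grid S p).2 (Or.inl hpS), by simp [hpt, Wb_target]⟩
    · exact ⟨q, (mem_bGrow grid S q).2 (Or.inr ⟨⟨p, hpS, hnb⟩, hv⟩), hw⟩

theorem sat_iff (grid : List (List Int)) (target : Int × Int) (S : PySem.Set (Int × Int))
    (hsat : ∀ x, x ∈ bGrow grid S ↔ x ∈ S) (n : Nat) :
    (∃ p ∈ S, Wb grid target n p = true) ↔ target ∈ S := by
  induction n with
  | zero =>
    constructor
    · rintro ⟨p, hp, hw⟩; simp [Wb] at hw; subst hw; exact hp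
    · intro h; exact ⟨target, h, by simp [Wb]⟩
  | succ m ih =>
    rw [← step_iff]
    constructor
    · rintro ⟨q, hq, hw⟩; exact ih.1 ⟨q, (hsat q).1 hq, hw⟩
    · intro h
      rcases ih.2 h with ⟨p, hp, hw⟩
      exact ⟨p, (hsat p).2 hp, hw⟩

theorem bLoop_iff (grid : List (List Int)) (target : Int × Int) :
    ∀ (j : Nat) (S : PySem.Set (Int × Int)),
      bLoop grid target j S = true ↔ ∃ p ∈ S, Wb grid target j p = true := by
  intro j
  induction j with
  | zero =>
    intro S
    simp only [bLoop, PySem.Set.contains_iff]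
    constructor
    · intro h; exact ⟨target, h, by simp [Wb]⟩
    · rintro ⟨p, hp, hw⟩; simp [Wb] at hw; subst hw; exact hp
  | succ m ih =>
    intro S
    simp only [bLoop]
    split_ifs with heq
    · have hsat : ∀ x, x ∈ bGrow grid S ↔ x ∈ S :=
        fun x => (PySem.Set.equal_iff _ _).1 heq x
      rw [PySem.Set.contains_iff, sat_iff grid target S hsat (m+1)]
    · rw [ih (bGrow grid S), step_iff]

theorem B_eq_Wb (cur : Int × Int) (grid : List (List Int)) (s target : Int × Int) (k : Int)
    (hk : 0 < k) (hct : cur ≠ target) :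
    can_reach_target_alt cur grid s target k = Wb grid target k.toNat cur := by
  have hk' : ¬ k ≤ 0 := by omega
  rw [can_reach_target_alt]
  simp only [hct, if_false, hk', if_false]
  have h1 : PySem.Set.ofList [cur] = [cur] := rfl
  rw [h1]
  cases hW : Wb grid target k.toNat cur
  · rw [Bool.eq_false_iff]
    intro hl
    rcases (bLoop_iff grid target k.toNat [cur]).1 hl with ⟨p, hp, hw⟩
    simp at hp; subst hp
    rw [hW] at hw; simp at hw
  · exact (bLoop_iff grid target k.toNat [cur]).2 ⟨cur, by simp, hW⟩

-- ===== VERDICT (by name: the statement is the Claim_ definition above) =====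
theorem can_reach_target_spec : Claim_equal_can_reach_target := by
  intro cur grid s target k _hDom _hPre
  unfold Spec_can_reach_target
  by_cases hct : cur = target
  · rw [can_reach_target, can_reach_target_alt]; simp [hct]
  · by_cases hk : k ≤ 0
    · rw [can_reach_target, can_reach_target_alt]
      simp only [hct, if_false, hk, if_true]
      rcases lt_or_eq_of_le hk with h | h
      · simp [h, show ¬ (k = 0) by omega]
      · simp [h]
    · rw [B_eq_Wb cur grid s target k (by omega) hct,
          A_eq_Wb grid s target k.toNat k (by omega) rfl cur]
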